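-- pv_equiv track=rewrite | github.com/jesucr1st0/Bipartitions | src/funcs/iit.py | get_restricted_combinations
-- ===== SOURCE A (Python) =====
-- from itertools import product
--
-- def get_restricted_combinations(binary_str: str) -> tuple[list[str], list[str]]:
--     """
--     Genera las combinaciones para B y C basadas en la cadena binaria A.
--     B solo puede tener 1s donde A tiene 1s.
--     """
--     # Contar cuántos 1s hay en la cadena
--     ones_count = binary_str.count("1")
--     width = len(binary_str)
--
--     # Encontrar las posiciones de los 1s en A
--     one_positions = [i for i, bit in enumerate(binary_str) if bit == "1"]
--
--     def generate_valid_combinations():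
--         # Generamos todas las combinaciones posibles de 0s y 1s para las posiciones donde A tiene 1s
--         base_combinations = list(product(["0", "1"], repeat=ones_count))
--         valid_combinations = []
--
--         # Para cada combinación base, creamos una cadena del ancho total
--         for comb in base_combinations:
--             # Empezamos con todos 0s
--             result = ["0"] * width
--             # Colocamos los bits de la combinación en las posiciones donde A tiene 1s
--             for pos, bit in zip(one_positions, comb):
--                 result[pos] = bit
--             valid_combinations.append("".join(result))
--
--         return valid_combinations
--
--     # B tiene restricciones, C no
--     B = generate_valid_combinations()
--     C = (
--         B.copy()
--     )  # En este caso C es igual a B, pero podría ser diferente si se necesita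
--
--     return B, C
-- ===== SOURCE B (Python) =====
-- def get_restricted_combinations(binary_str: str) -> tuple[list[str], list[str]]:
--     """
--     Genera las combinaciones para B y C basadas en la cadena binaria A.
--     B solo puede tener 1s donde A tiene 1s.
--     """
--     cur = [""]
--     for ch in binary_str:
--         if ch == "1":
--             cur = [s + b for s in cur for b in ("0", "1")]
--         else:
--             cur = [s + "0" for s in cur]
--     return cur, cur.copy()
-- ===== Notes on version B (the rewrite author's own statement) =====
-- stated objective: simpler
-- what changed: Replaces itertools.product over the one-positions plus a per-combination scatter into a width-long buffer by a single left-to-right sweep that appends the zero bit to every partial string (or branches on both bits at a one position), producing the same strings in the same order.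
import Mathlib
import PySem

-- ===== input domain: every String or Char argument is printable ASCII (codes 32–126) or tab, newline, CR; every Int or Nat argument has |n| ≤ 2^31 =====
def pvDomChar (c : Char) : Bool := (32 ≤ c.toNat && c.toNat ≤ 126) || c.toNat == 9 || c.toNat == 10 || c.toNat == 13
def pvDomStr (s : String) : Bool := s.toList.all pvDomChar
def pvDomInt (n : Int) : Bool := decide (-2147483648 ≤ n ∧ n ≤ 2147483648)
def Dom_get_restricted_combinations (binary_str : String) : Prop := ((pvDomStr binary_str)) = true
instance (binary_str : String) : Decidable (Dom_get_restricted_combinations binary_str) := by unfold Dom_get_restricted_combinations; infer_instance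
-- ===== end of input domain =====

-- B replaces itertools.product + the one_positions scatter by one left-to-right sweep that
-- extends every partial string per character (objective: simpler; same values, same order).

-- ===== PORT A =====
-- itertools.product(["0", "1"], repeat=n), ported step for step (first factor varies slowest)
def pvProduct : Nat → List (List String)
  | 0 => [[]]
  | n+1 => (["0", "1"] : List String).flatMap (fun x => (pvProduct n).map (fun t => x :: t))

def get_restricted_combinations (binary_str : String) : List String × List String :=
  let ones_count : Nat := PySem.Str.count binary_str "1"
  let width : Int := PySem.Str.len binary_str
  let one_positions : List Int :=
    ((PySem.List.enumerate binary_str.toList).filter (fun p => p.2 == '1')).map (fun p => p.1)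
  let base_combinations : List (List String) := pvProduct ones_count
  let valid_combinations : List String :=
    base_combinations.foldl
      (fun acc comb =>
        let result : List String := PySem.List.pyRepeat ["0"] width
        let result : List String :=
          (one_positions.zip comb).foldl (fun r pb => PySem.List.pySetD r pb.1 pb.2) result
        acc ++ [PySem.Str.join "" result])
      []
  let B := valid_combinations
  let C := B
  (B, C)

-- ===== PORT B =====
def get_restricted_combinations_alt (binary_str : String) : List String × List String :=
  let cur : List String :=
    binary_str.toList.foldl
      (fun cur ch =>
        if ch = '1' then cur.flatMap (fun s => (["0", "1"] : List String).map (fun b => s ++ b))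
        else cur.map (fun s => s ++ "0"))
      [""]
  (cur, cur)

-- ===== PRECONDITION & SPEC =====
def Spec_get_restricted_combinations (binary_str : String) (out : List String × List String) : Prop := out = get_restricted_combinations_alt binary_str
instance (binary_str : String) (out : List String × List String) : Decidable (Spec_get_restricted_combinations binary_str out) := by unfold Spec_get_restricted_combinations; infer_instance

-- ===== CLAIM (what is proved, stated in full; the proofs are below) =====
def Claim_equal_get_restricted_combinations : Prop := ∀ (binary_str : String), Dom_get_restricted_combinations binary_str → Spec_get_restricted_combinations binary_str (get_restricted_combinations binary_str)

-- ===== LEMMAS AND PROOFS =====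

-- indices of the '1' characters, as naturals
def pvOnes : List Char → List Nat
  | [] => []
  | c :: cs => (if c = '1' then [0] else []) ++ (pvOnes cs).map (· + 1)

-- the common result, as character lists: all strings with '1' only where cs has '1'
def pvSuf : List Char → List (List Char)
  | [] => [[]]
  | c :: cs =>
      if c = '1' then (pvSuf cs).map ('0' :: ·) ++ (pvSuf cs).map ('1' :: ·)
      else (pvSuf cs).map ('0' :: ·)

-- what A's scatter loop produces for one combination
def pvBuild : List Char → List String → List String
  | [], _ => []
  | c :: cs, comb =>
      if c = '1' then comb.headD "0" :: pvBuild cs comb.tail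
      else "0" :: pvBuild cs comb

def pvFlat (cs : List Char) (comb : List String) : List Char :=
  ((pvBuild cs comb).map String.toList).flatten

theorem pv_len_ones (cs : List Char) : (pvOnes cs).length = cs.countP (· == '1') := by
  induction cs with
  | nil => simp [pvOnes]
  | cons c cs ih =>
      by_cases h : c = '1' <;> simp [pvOnes, h, ih]

theorem pv_go_single (c : Char) : ∀ (fuel : Nat) (l : List Char), l.length ≤ fuel →
    ∀ (acc : Nat), PySem.Chars.count.go [c] fuel l acc = acc + l.countP (· == c) := by
  intro fuel
  induction fuel with
  | zero =>
      intro l hl acc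
      have : l = [] := List.eq_nil_of_length_eq_zero (Nat.le_zero.mp hl)
      subst this; simp [PySem.Chars.count.go]
  | succ n ih =>
      intro l hl acc
      cases l with
      | nil => simp [PySem.Chars.count.go]
      | cons h t =>
          have ht : t.length ≤ n := by simp at hl; omega
          rw [PySem.Chars.count.go]
          by_cases hc : c = h
          · subst hc
            simp [List.isPrefixOf, ih t ht]
            omega
          · have hc1 : (c == h) = false := by simpa using hc
            simp [List.isPrefixOf, hc1, ih t ht,
              show (h == c) = false by simpa using (Ne.symm hc)]

theorem pv_count_single (cs : List Char) :
    PySem.Chars.count cs ['1'] = cs.countP (· == '1') := by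
  have h := pv_go_single '1' cs.length cs (le_refl _) 0
  simpa [PySem.Chars.count] using h

theorem pv_enum (cs : List Char) : ∀ (k : Int),
    (((PySem.List.enumerate cs k).filter (fun p => p.2 == '1')).map (fun p => p.1))
      = (pvOnes cs).map (fun q : Nat => k + Int.ofNat q) := by
  induction cs with
  | nil => intro k; simp [PySem.List.enumerate, pvOnes]
  | cons c cs ih =>
      intro k
      rw [PySem.List.enumerate_cons, List.filter_cons]
      by_cases h : c = '1'
      · rw [if_pos (by simpa using h)]
        rw [List.map_cons, ih (k + 1)]
        simp only [pvOnes, if_pos h, List.singleton_append, List.map_cons, List.map_map]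
        refine List.cons_eq_cons.mpr ⟨by simp, ?_⟩
        apply List.map_congr_left; intro q _
        simp only [Function.comp, Int.ofNat_eq_natCast]; push_cast; ring
      · rw [if_neg (by simpa using h)]
        rw [ih (k + 1)]
        simp only [pvOnes, if_neg h, List.nil_append, List.map_map]
        apply List.map_congr_left; intro q _
        simp only [Function.comp, Int.ofNat_eq_natCast]; push_cast; ring

-- the pySetD fold over Int positions cast from naturals is the List.set fold over the naturals
theorem pv_intfold : ∀ (qs : List Nat) (comb : List String) (r : List String),
    ((qs.map (fun q : Nat => Int.ofNat q)).zip comb).foldl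
        (fun r pb => PySem.List.pySetD r pb.1 pb.2) r
      = (qs.zip comb).foldl (fun r pb => r.set pb.1 pb.2) r := by
  intro qs
  induction qs with
  | nil => intro comb r; simp
  | cons q qs ih =>
      intro comb r
      cases comb with
      | nil => simp
      | cons b bs =>
          simp only [List.map_cons, List.zip_cons_cons, List.foldl_cons,
            Int.ofNat_eq_natCast, PySem.List.pySetD_natCast]
          exact ih bs _

-- setting only shifted positions leaves the head alone
theorem pv_zipshift : ∀ (qs : List Nat) (comb : List String) (x : String) (r : List String),
    ((qs.map (· + 1)).zip comb).foldl (fun r pb => r.set pb.1 pb.2) (x :: r)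
      = x :: (qs.zip comb).foldl (fun r pb => r.set pb.1 pb.2) r := by
  intro qs
  induction qs with
  | nil => intro comb x r; simp
  | cons q qs ih =>
      intro comb x r
      cases comb with
      | nil => simp
      | cons b bs =>
          simp only [List.map_cons, List.zip_cons_cons, List.foldl_cons, List.set_cons_succ]
          exact ih bs x _

theorem pv_scat (cs : List Char) : ∀ (comb : List String),
    ((pvOnes cs).zip comb).foldl (fun r pb => r.set pb.1 pb.2) (List.replicate cs.length "0")
      = pvBuild cs comb := by
  induction cs with
  | nil => intro comb; simp [pvOnes, pvBuild]
  | cons c cs ih =>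
      intro comb
      by_cases h : c = '1'
      · cases comb with
        | nil =>
            simp [pvOnes, h, pvBuild, List.replicate_succ, ← ih []]
        | cons b bs =>
            simp only [pvOnes, if_pos h, List.singleton_append, List.zip_cons_cons,
              List.length_cons, List.replicate_succ, List.foldl_cons, List.set_cons_zero]
            rw [pv_zipshift, ih bs]
            simp [pvBuild, h]
      · simp only [pvOnes, if_neg h, List.nil_append, List.length_cons, List.replicate_succ]
        rw [pv_zipshift, ih comb]
        simp [pvBuild, h]

theorem pv_main (cs : List Char) :
    (pvProduct (pvOnes cs).length).map (pvFlat cs) = pvSuf cs := by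
  induction cs with
  | nil => simp [pvOnes, pvProduct, pvSuf, pvFlat, pvBuild]
  | cons c cs ih =>
      by_cases h : c = '1'
      · have hlen : (pvOnes (c :: cs)).length = (pvOnes cs).length + 1 := by
          simp [pvOnes, h]
        rw [hlen]
        simp only [pvProduct, List.flatMap_cons, List.flatMap_nil, List.append_nil,
          List.map_append, List.map_map]
        have h0 : (pvFlat (c :: cs)) ∘ (fun t => "0" :: t) = (('0' :: ·) ∘ pvFlat cs) := by
          funext t; simp [pvFlat, pvBuild, h]
        have h1 : (pvFlat (c :: cs)) ∘ (fun t => "1" :: t) = (('1' :: ·) ∘ pvFlat cs) := by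
          funext t; simp [pvFlat, pvBuild, h]
        rw [h0, h1, ← List.map_map, ← List.map_map, ih]
        simp [pvSuf, h]
      · have hlen : (pvOnes (c :: cs)).length = (pvOnes cs).length := by
          simp [pvOnes, h]
        rw [hlen]
        have h0 : pvFlat (c :: cs) = (('0' :: ·) ∘ pvFlat cs) := by
          funext comb; simp [pvFlat, pvBuild, h]
        rw [h0, ← List.map_map, ih]
        simp [pvSuf, h]

theorem pv_join_flatten (r : List String) :
    PySem.Str.join "" r = String.ofList ((r.map String.toList).flatten) := by
  rw [← String.ofList_toList (s := PySem.Str.join "" r)]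
  congr 1
  rw [PySem.Str.toList_join, show ("" : String).toList = [] from rfl]
  induction r with
  | nil => simp [PySem.Chars.join_nil]
  | cons p rest ih =>
      cases rest with
      | nil => simp [PySem.Chars.join_singleton]
      | cons q rest' =>
          simp only [List.map_cons, PySem.Chars.join_cons_cons, List.flatten_cons] at *
          simp [ih]

theorem pv_app (s : String) (c : Char) (t : List Char) :
    (s ++ String.ofList [c]) ++ String.ofList t = s ++ String.ofList (c :: t) := by
  rw [String.append_assoc, ← String.ofList_append]
  rfl

theorem pv_foldB (cs : List Char) : ∀ (acc : List String),
    cs.foldl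
      (fun cur ch =>
        if ch = '1' then cur.flatMap (fun s => (["0", "1"] : List String).map (fun b => s ++ b))
        else cur.map (fun s => s ++ "0"))
      acc
    = acc.flatMap (fun s => (pvSuf cs).map (fun t => s ++ String.ofList t)) := by
  induction cs with
  | nil => intro acc; simp [pvSuf]
  | cons c cs ih =>
      intro acc
      by_cases h : c = '1'
      · subst h
        rw [List.foldl_cons, if_pos rfl, ih, List.flatMap_assoc]
        simp only [pvSuf, if_pos]
        congr 1
        funext s
        simp only [List.map_cons, List.map_nil, List.flatMap_cons, List.flatMap_nil,
          List.append_nil, List.map_append, List.map_map]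
        congr 1
        · apply List.map_congr_left; intro t _
          simpa using pv_app s '0' t
        · apply List.map_congr_left; intro t _
          simpa using pv_app s '1' t
      · rw [List.foldl_cons, if_neg h, ih, List.flatMap_map]
        simp only [pvSuf, if_neg h]
        congr 1
        funext s
        simp only [List.map_map]
        apply List.map_congr_left; intro t _
        simpa using pv_app s '0' t

-- A's valid_combinations list equals the common result
theorem pv_A_eq (s : String) :
    (pvProduct (PySem.Str.count s "1")).foldl
      (fun acc comb =>
        acc ++ [PySem.Str.join ""
          (((((PySem.List.enumerate s.toList).filter (fun p => p.2 == '1')).map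
              (fun p => p.1)).zip comb).foldl
            (fun r pb => PySem.List.pySetD r pb.1 pb.2)
            (PySem.List.pyRepeat ["0"] (PySem.Str.len s)))])
      []
    = (pvSuf s.toList).map String.ofList := by
  have hcount : PySem.Str.count s "1" = (pvOnes s.toList).length := by
    rw [PySem.Str.count_eq, show ("1" : String).toList = ['1'] from rfl,
      pv_count_single, pv_len_ones]
  have hpos : (((PySem.List.enumerate s.toList).filter (fun p => p.2 == '1')).map
      (fun p => p.1)) = (pvOnes s.toList).map (fun q : Nat => Int.ofNat q) := by
    rw [pv_enum s.toList 0]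
    apply List.map_congr_left; intro q _; simp
  have hrep : PySem.List.pyRepeat ["0"] (PySem.Str.len s)
      = List.replicate s.toList.length "0" := by
    rw [PySem.List.pyRepeat_singleton, PySem.Str.len_eq]; simp
  rw [PySem.List.foldl_append_singleton_eq_map, List.nil_append, hcount]
  rw [← pv_main s.toList, List.map_map]
  apply List.map_congr_left; intro comb _
  rw [hpos, hrep, pv_intfold, pv_scat, pv_join_flatten]
  rfl

-- ===== VERDICT (by name: the statement is the Claim_ definition above) =====
theorem get_restricted_combinations_spec : Claim_equal_get_restricted_combinations := by
  unfold Claim_equal_get_restricted_combinations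
  intro s _
  unfold Spec_get_restricted_combinations get_restricted_combinations
    get_restricted_combinations_alt
  have hB : s.toList.foldl
      (fun cur ch =>
        if ch = '1' then cur.flatMap (fun s => (["0", "1"] : List String).map (fun b => s ++ b))
        else cur.map (fun s => s ++ "0"))
      [""]
      = (pvSuf s.toList).map String.ofList := by
    rw [pv_foldB s.toList [""]]
    simp
  rw [hB]
  have hA := pv_A_eq s
  simp only [] at hA ⊢
  rw [hA]
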